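-- pv_equiv track=rewrite | github.com/ufal/flexipipe | flexipipe/__main__.py | _tasks_to_backend_components
-- ===== SOURCE A (Python) =====
-- from typing import Any, Collection, Dict, List, Optional, Tuple
--
-- def _tasks_to_backend_components(tasks: set[str], backend: Optional[str]) -> Optional[List[str]]:
--     backend_lower = (backend or "").lower()
--     if backend_lower == "flair":
--         components: List[str] = []
--         if any(task in tasks for task in ("tag", "lemmatize", "parse")):
--             components.append("upos")
--         if "xpos" in tasks:
--             components.append("xpos")
--         if "ner" in tasks:
--             components.append("ner")
--         if "wsd" in tasks:
--             components.append("wsd")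
--         return components or None
--     if backend_lower in {"udpipe", "udpipe1"}:
--         components: List[str] = []
--         if any(task in tasks for task in ("tag", "lemmatize", "parse")):
--             components.append("tagger")
--         if "parse" in tasks:
--             components.append("parser")
--         return components
--     return None
-- ===== SOURCE B (Python) =====
-- _RULES = {
--     "flair": [("upos", ("tag", "lemmatize", "parse")),
--               ("xpos", ("xpos",)),
--               ("ner", ("ner",)),
--               ("wsd", ("wsd",))],
--     "udpipe": [("tagger", ("tag", "lemmatize", "parse")),
--                ("parser", ("parse",))],
-- }
--
-- def _tasks_to_backend_components(tasks, backend):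
--     key = (backend or "").lower()
--     if key == "udpipe1":
--         key = "udpipe"
--     rules = _RULES.get(key)
--     if rules is None:
--         return None
--     components = [name for name, triggers in rules
--                   if any(t in tasks for t in triggers)]
--     if key == "flair":
--         return components or None
--     return components
-- ===== Notes on version B (the rewrite author's own statement) =====
-- stated objective: idiomatic
-- what changed: Replaced the per-backend chains of if/append statements with a single declarative rule table (backend -> ordered list of (component, trigger task set)) consumed by one generic filter, keeping the flair-only 'empty becomes None' rule.
import Mathlib
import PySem

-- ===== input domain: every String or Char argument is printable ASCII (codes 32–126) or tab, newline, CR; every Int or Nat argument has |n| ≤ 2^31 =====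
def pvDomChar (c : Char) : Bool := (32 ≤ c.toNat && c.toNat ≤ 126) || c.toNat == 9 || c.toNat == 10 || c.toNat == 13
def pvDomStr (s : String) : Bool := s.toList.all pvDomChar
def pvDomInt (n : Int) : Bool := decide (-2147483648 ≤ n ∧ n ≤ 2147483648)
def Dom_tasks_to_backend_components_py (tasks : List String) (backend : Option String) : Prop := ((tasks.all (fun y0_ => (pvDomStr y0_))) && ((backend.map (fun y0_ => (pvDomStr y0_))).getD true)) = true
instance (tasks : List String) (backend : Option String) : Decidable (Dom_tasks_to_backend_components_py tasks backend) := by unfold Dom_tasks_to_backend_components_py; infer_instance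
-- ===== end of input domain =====

-- B replaces the per-backend if/append chains with a declarative rule table consumed by one
-- generic filter (idiomatic, same cost); return value only, neither version mutates arguments.

-- ===== PORT A =====
-- literal transliteration: (backend or "").lower(), then the if/append chains
def tasks_to_backend_components_py (tasks : List String) (backend : Option String) : Option (List String) :=
  let backend_lower := PySem.Str.lower (match backend with | some s => if s = "" then "" else s | none => "")
  if backend_lower = "flair" then
    let components : List String := []
    let components := if ["tag", "lemmatize", "parse"].any (fun task => tasks.contains task) then components ++ ["upos"] else components
    let components := if tasks.contains "xpos" then components ++ ["xpos"] else components
    let components := if tasks.contains "ner" then components ++ ["ner"] else components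
    let components := if tasks.contains "wsd" then components ++ ["wsd"] else components
    if components = [] then none else some components
  else if backend_lower = "udpipe" ∨ backend_lower = "udpipe1" then
    let components : List String := []
    let components := if ["tag", "lemmatize", "parse"].any (fun task => tasks.contains task) then components ++ ["tagger"] else components
    let components := if tasks.contains "parse" then components ++ ["parser"] else components
    some components
  else
    none

-- ===== PORT B =====
-- the rule table: backend key -> ordered list of (component, trigger tasks)
def pvAltRules (key : String) : Option (List (String × List String)) :=
  if key = "flair" then
    some [("upos", ["tag", "lemmatize", "parse"]), ("xpos", ["xpos"]), ("ner", ["ner"]), ("wsd", ["wsd"])]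
  else if key = "udpipe" then
    some [("tagger", ["tag", "lemmatize", "parse"]), ("parser", ["parse"])]
  else
    none

def tasks_to_backend_components_py_alt (tasks : List String) (backend : Option String) : Option (List String) :=
  let key0 := PySem.Str.lower (match backend with | some s => if s = "" then "" else s | none => "")
  let key := if key0 = "udpipe1" then "udpipe" else key0
  match pvAltRules key with
  | none => none
  | some rules =>
    let components := (rules.filter (fun r => r.2.any (fun t => tasks.contains t))).map (fun r => r.1)
    if key = "flair" then (if components = [] then none else some components) else some components

-- ===== PRECONDITION & SPEC =====
def Spec_tasks_to_backend_components_py (tasks : List String) (backend : Option String) (out : Option (List String)) : Prop := out = tasks_to_backend_components_py_alt tasks backend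
instance (tasks : List String) (backend : Option String) (out : Option (List String)) : Decidable (Spec_tasks_to_backend_components_py tasks backend out) := by unfold Spec_tasks_to_backend_components_py; infer_instance

-- ===== CLAIM (what is proved, stated in full; the proofs are below) =====
def Claim_equal_tasks_to_backend_components_py : Prop := ∀ (tasks : List String) (backend : Option String), Dom_tasks_to_backend_components_py tasks backend → Spec_tasks_to_backend_components_py tasks backend (tasks_to_backend_components_py tasks backend)

-- ===== LEMMAS AND PROOFS =====

-- ===== VERDICT (by name: the statement is the Claim_ definition above) =====
set_option maxHeartbeats 1000000 in
theorem tasks_to_backend_components_py_spec : Claim_equal_tasks_to_backend_components_py := by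
  intro tasks backend h
  clear h
  unfold Spec_tasks_to_backend_components_py tasks_to_backend_components_py tasks_to_backend_components_py_alt pvAltRules
  generalize PySem.Str.lower (match backend with | some s => if s = "" then "" else s | none => "") = bl
  by_cases h1 : bl = "flair"
  · subst h1
    by_cases c1 : tasks.contains "tag" <;> by_cases c2 : tasks.contains "lemmatize" <;>
    by_cases c3 : tasks.contains "parse" <;> by_cases c4 : tasks.contains "xpos" <;>
    by_cases c5 : tasks.contains "ner" <;> by_cases c6 : tasks.contains "wsd" <;>
    simp_all
  · by_cases h2 : bl = "udpipe" <;> by_cases h3 : bl = "udpipe1" <;>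
    by_cases c1 : tasks.contains "tag" <;> by_cases c2 : tasks.contains "lemmatize" <;>
    by_cases c3 : tasks.contains "parse" <;>
    simp_all
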